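-- pv_equiv track=rewrite | github.com/ExtremeFLOW/neko | contrib/add_unit_test/add_unit_test.py | insert_before_pattern_in_block
-- ===== SOURCE A (Python) =====
-- def insert_before_pattern_in_block(
--     lines: list[str],
--     block_start: str,
--     block_end: str,
--     pattern: str,
--     new_line: str,
-- ) -> list[str]:
--     """Insert a line before an anchor that must appear within a specific block."""
--
--     # If the new line is already present, assume the change was made and do not insert
--     if new_line in lines:
--         return lines
--
--     # Go through lines, first search for the block_start, and then a line with
--     # the patter before the block_end.
--     in_block = False
--     for index, line in enumerate(lines):
--         if block_start in line:
--             in_block = True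
--         if in_block and pattern in line:
--             return lines[:index] + [new_line] + lines[index:]
--         if in_block and block_end in line:
--             in_block = False
--     raise ValueError(f"could not find anchor in block: {pattern}")
-- ===== SOURCE B (Python) =====
-- def insert_before_pattern_in_block(
--     lines: list[str],
--     block_start: str,
--     block_end: str,
--     pattern: str,
--     new_line: str,
-- ) -> list[str]:
--     """Insert a line before an anchor that must appear within a specific block."""
--     if new_line in lines:
--         return lines
--     n = len(lines)
--     i = 0
--     while i < n:
--         if block_start in lines[i]:
--             # inner scan over the open block, starting at the opening line itself
--             j = i
--             while j < n:
--                 if pattern in lines[j]: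
--                     return lines[:j] + [new_line] + lines[j:]
--                 if block_end in lines[j]:
--                     break
--                 j += 1
--             if j >= n:
--                 break  # ran off the end inside an unclosed block: nothing left to search
--             i = j + 1  # resume the outer search after the closed block
--         else:
--             i += 1
--     raise ValueError(f"could not find anchor in block: {pattern}")
-- ===== Notes on version B (the rewrite author's own statement) =====
-- stated objective: alternative
-- what changed: Replaces the single flat loop with an in_block boolean flag by an index-based nested scan: an outer loop finds each block-opening line and an inner loop scans that block for the pattern (inserting there) or for the block end (resuming the outer loop after it); no flag state is kept.
import Mathlib
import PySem

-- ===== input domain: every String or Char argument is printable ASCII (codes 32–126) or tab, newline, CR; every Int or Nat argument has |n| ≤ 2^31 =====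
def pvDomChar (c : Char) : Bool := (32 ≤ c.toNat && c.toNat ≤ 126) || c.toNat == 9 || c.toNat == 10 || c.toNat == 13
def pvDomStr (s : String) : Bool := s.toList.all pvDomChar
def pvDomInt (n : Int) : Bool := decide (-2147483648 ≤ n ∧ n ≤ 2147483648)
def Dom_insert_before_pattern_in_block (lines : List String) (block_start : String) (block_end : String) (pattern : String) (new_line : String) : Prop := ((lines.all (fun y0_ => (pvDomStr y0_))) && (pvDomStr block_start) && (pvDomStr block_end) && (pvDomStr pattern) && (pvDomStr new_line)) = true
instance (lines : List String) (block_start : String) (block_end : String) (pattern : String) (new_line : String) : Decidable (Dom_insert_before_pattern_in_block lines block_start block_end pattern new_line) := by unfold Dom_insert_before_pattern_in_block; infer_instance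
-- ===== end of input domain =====

-- B replaces A's flat flag-carrying loop by an index-based nested scan (outer loop over block
-- openings, inner scan of each block); same values everywhere A returns ('alternative', no speed claim).

-- ===== PORT A =====
-- the flag loop of A: `rest` is the suffix of `lines` from `index`; returns [] where Python raises ValueError
def ibpA_loop (lines : List String) (block_start : String) (block_end : String)
    (pattern : String) (new_line : String)
    (rest : List String) (index : Nat) (in_block : Bool) : List String :=
  match rest with
  | [] => []
  | line :: rs =>
    let inb := if PySem.Str.isIn block_start line then true else in_block
    if inb && PySem.Str.isIn pattern line then
      lines.take index ++ [new_line] ++ lines.drop index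
    else
      let inb2 := if inb && PySem.Str.isIn block_end line then false else inb
      ibpA_loop lines block_start block_end pattern new_line rs (index + 1) inb2

def insert_before_pattern_in_block (lines : List String) (block_start : String) (block_end : String) (pattern : String) (new_line : String) : List String :=
  if lines.contains new_line then lines
  else ibpA_loop lines block_start block_end pattern new_line lines 0 false

-- ===== PORT B =====
-- inner scan of one open block: `some (.inl k)` = insert at k, `some (.inr (k, rs))` = block
-- closed before line k with suffix rs, `none` = ran off the end
def ibpB_inner (block_end : String) (pattern : String)
    (rest : List String) (j : Nat) : Option (Nat ⊕ (Nat × List String)) :=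
  match rest with
  | [] => none
  | line :: rs =>
    if PySem.Str.isIn pattern line then some (Sum.inl j)
    else if PySem.Str.isIn block_end line then some (Sum.inr (j + 1, rs))
    else ibpB_inner block_end pattern rs (j + 1)

-- termination helper for the outer loop: a closed block strictly shrinks the suffix
theorem ibpB_inner_shrink (block_end pattern : String) :
    ∀ (rest : List String) (j k : Nat) (rs' : List String),
      ibpB_inner block_end pattern rest j = some (Sum.inr (k, rs')) →
      rs'.length < rest.length := by
  intro rest
  induction rest with
  | nil => intro j k rs' h; simp [ibpB_inner] at h
  | cons line rs ih =>
    intro j k rs' h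
    simp only [ibpB_inner] at h
    split at h
    · simp at h
    · split at h
      · simp at h
        obtain ⟨_, h2⟩ := h
        simp [← h2]
      · have := ih (j + 1) k rs' h
        simp only [List.length_cons]
        omega

def ibpB_outer (lines : List String) (block_start : String) (block_end : String)
    (pattern : String) (new_line : String)
    (rest : List String) (i : Nat) : List String :=
  match rest with
  | [] => []
  | line :: rs =>
    if PySem.Str.isIn block_start line then
      match h : ibpB_inner block_end pattern (line :: rs) i with
      | some (Sum.inl k) => lines.take k ++ [new_line] ++ lines.drop k
      | some (Sum.inr (k, rs')) => ibpB_outer lines block_start block_end pattern new_line rs' k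
      | none => []
    else ibpB_outer lines block_start block_end pattern new_line rs (i + 1)
termination_by rest.length
decreasing_by
  · exact ibpB_inner_shrink block_end pattern (line :: rs) i k rs' h
  · simp

def insert_before_pattern_in_block_alt (lines : List String) (block_start : String) (block_end : String) (pattern : String) (new_line : String) : List String :=
  if lines.contains new_line then lines
  else ibpB_outer lines block_start block_end pattern new_line lines 0

-- ===== PRECONDITION & SPEC =====
-- Pre_ excludes exactly the inputs where Python A raises ValueError (no line containing the
-- pattern lies in an open block and new_line is absent); Python B raises the same error there.
def Pre_insert_before_pattern_in_block (lines : List String) (block_start : String) (block_end : String) (pattern : String) (new_line : String) : Prop :=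
  lines.contains new_line = true ∨
  ∃ i, i < lines.length ∧ PySem.Str.isIn pattern (lines.getD i "") = true ∧
    (PySem.Str.isIn block_start (lines.getD i "") = true ∨
     ∃ s, s < i ∧ PySem.Str.isIn block_start (lines.getD s "") = true ∧
       ∀ k, k < i → s ≤ k → PySem.Str.isIn block_end (lines.getD k "") = false)
instance (lines : List String) (block_start : String) (block_end : String) (pattern : String) (new_line : String) : Decidable (Pre_insert_before_pattern_in_block lines block_start block_end pattern new_line) := by unfold Pre_insert_before_pattern_in_block; infer_instance

def pvWitness_insert_before_pattern_in_block : List String × String × String × String × String :=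
  (["begin block", "anchor here", "end block"], "begin", "end block", "anchor", "new line")

def Spec_insert_before_pattern_in_block (lines : List String) (block_start : String) (block_end : String) (pattern : String) (new_line : String) (out : List String) : Prop := out = insert_before_pattern_in_block_alt lines block_start block_end pattern new_line
instance (lines : List String) (block_start : String) (block_end : String) (pattern : String) (new_line : String) (out : List String) : Decidable (Spec_insert_before_pattern_in_block lines block_start block_end pattern new_line out) := by unfold Spec_insert_before_pattern_in_block; infer_instance

-- ===== CLAIM (what is proved, stated in full; the proofs are below) =====
def Claim_equal_insert_before_pattern_in_block : Prop := ∀ (lines : List String) (block_start : String) (block_end : String) (pattern : String) (new_line : String), Dom_insert_before_pattern_in_block lines block_start block_end pattern new_line → Pre_insert_before_pattern_in_block lines block_start block_end pattern new_line → Spec_insert_before_pattern_in_block lines block_start block_end pattern new_line (insert_before_pattern_in_block lines block_start block_end pattern new_line)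

-- ===== LEMMAS AND PROOFS =====

-- inside an open block A's flag loop is exactly B's inner scan
theorem ibpA_true_eq_inner (lines : List String) (bs be pt nl : String) :
    ∀ (rest : List String) (i : Nat),
      ibpA_loop lines bs be pt nl rest i true =
        (match ibpB_inner be pt rest i with
         | some (Sum.inl k) => lines.take k ++ [nl] ++ lines.drop k
         | some (Sum.inr (k, rs')) => ibpA_loop lines bs be pt nl rs' k false
         | none => []) := by
  intro rest
  induction rest with
  | nil => intro i; simp [ibpA_loop, ibpB_inner]
  | cons line rs ih =>
    intro i
    simp only [ibpA_loop, ibpB_inner, ite_self]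
    by_cases hp : PySem.Chars.isIn pt.toList line.toList = true
    · simp [hp]
    · by_cases he : PySem.Chars.isIn be.toList line.toList = true
      · simp [hp, he]
      · simp [hp, he, ih]

-- A's flag loop (flag down) equals B's outer loop, by strong induction on the suffix length
theorem ibpA_false_eq_outer (lines : List String) (bs be pt nl : String) :
    ∀ (n : Nat) (rest : List String) (i : Nat), rest.length ≤ n →
      ibpA_loop lines bs be pt nl rest i false =
        ibpB_outer lines bs be pt nl rest i := by
  intro n
  induction n with
  | zero =>
    intro rest i hlen
    have : rest = [] := List.length_eq_zero_iff.mp (Nat.le_zero.mp hlen)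
    subst this
    simp [ibpA_loop, ibpB_outer]
  | succ m ih =>
    intro rest i hlen
    match rest with
    | [] => simp [ibpA_loop, ibpB_outer]
    | line :: rs =>
      by_cases hb : PySem.Chars.isIn bs.toList line.toList = true
      · have hA : ibpA_loop lines bs be pt nl (line :: rs) i false =
            ibpA_loop lines bs be pt nl (line :: rs) i true := by
          simp [ibpA_loop, hb]
        rw [hA, ibpA_true_eq_inner]
        rw [ibpB_outer]
        simp only [PySem.Str.isIn_eq, hb, if_pos]
        rcases hin : ibpB_inner be pt (line :: rs) i with _ | val
        · rfl
        · rcases val with k | ⟨k, rs'⟩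
          · rfl
          · have hlt := ibpB_inner_shrink be pt (line :: rs) i k rs' hin
            have : rs'.length ≤ m := by
              simp only [List.length_cons] at hlt hlen; omega
            exact ih rs' k this
      · rw [ibpB_outer]
        simp only [PySem.Str.isIn_eq, hb, if_neg, Bool.false_eq_true, not_false_eq_true]
        have hA : ibpA_loop lines bs be pt nl (line :: rs) i false =
            ibpA_loop lines bs be pt nl rs (i + 1) false := by
          simp [ibpA_loop, hb]
        rw [hA]
        exact ih rs (i + 1) (by simp at hlen; omega)

-- ===== VERDICT (by name: the statement is the Claim_ definition above) =====
theorem insert_before_pattern_in_block_spec : Claim_equal_insert_before_pattern_in_block := by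
  intro lines bs be pt nl _ _
  unfold Spec_insert_before_pattern_in_block
  unfold insert_before_pattern_in_block insert_before_pattern_in_block_alt
  by_cases h : nl ∈ lines
  · simp [h]
  · simp only [List.contains_eq_mem, h, decide_false, Bool.false_eq_true, not_false_eq_true,
      if_neg]
    exact ibpA_false_eq_outer lines bs be pt nl lines.length lines 0 (le_refl _)
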